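-- pv_equiv track=rewrite | github.com/necoak/dev | atcoder/abc195/abc195_d1.py | calc_donyoku
-- ===== SOURCE A (Python) =====
-- def calc_donyoku(my_x, my_wv_list):
--     max_index = -1
--     max_v = -1
--     for i, (my_wi, my_vi) in enumerate(my_wv_list):
--         if ((my_wi <= my_x) and (my_vi > max_v)):
--             max_v = my_vi
--             max_index = i
--     return max_index, max_v
-- ===== SOURCE B (Python) =====
-- def calc_donyoku(my_x, my_wv_list):
--     # Pass 1: the best eligible value (no index bookkeeping).
--     best_v = max((v for w, v in my_wv_list if w <= my_x), default=-1)
--     if best_v <= -1: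
--         return -1, -1
--     # Pass 2: first position where that value occurs among eligible items.
--     idx = next(i for i, (w, v) in enumerate(my_wv_list) if w <= my_x and v == best_v)
--     return idx, best_v
-- ===== Notes on version B (the rewrite author's own statement) =====
-- stated objective: alternative
-- what changed: Replaces A's single pass that co-maintains (index, value) with two staged passes: pass 1 computes only the best eligible value via max(..., default=-1), pass 2 finds the first index where that value occurs among eligible items.
import Mathlib
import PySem

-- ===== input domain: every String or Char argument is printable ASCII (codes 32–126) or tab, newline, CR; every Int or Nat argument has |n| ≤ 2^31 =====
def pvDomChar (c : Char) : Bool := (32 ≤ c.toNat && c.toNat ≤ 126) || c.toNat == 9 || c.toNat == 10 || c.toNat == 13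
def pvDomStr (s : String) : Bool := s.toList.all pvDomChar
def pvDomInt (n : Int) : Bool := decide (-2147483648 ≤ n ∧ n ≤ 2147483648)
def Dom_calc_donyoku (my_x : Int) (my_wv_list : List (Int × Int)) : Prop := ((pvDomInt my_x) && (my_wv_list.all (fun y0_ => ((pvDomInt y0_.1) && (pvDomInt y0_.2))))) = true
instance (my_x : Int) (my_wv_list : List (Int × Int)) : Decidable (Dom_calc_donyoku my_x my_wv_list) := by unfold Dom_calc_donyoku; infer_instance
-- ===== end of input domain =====

-- B (alternative): two staged passes — first the best eligible value via max(..., default=-1), then the first index where it occurs — instead of A's single pass co-maintaining (index, value); same O(n) cost.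


-- ===== PORT A =====
def calc_donyoku (my_x : Int) (my_wv_list : List (Int × Int)) : Int × Int :=
  (PySem.List.enumerate my_wv_list).foldl
    (fun s p => if p.2.1 ≤ my_x ∧ p.2.2 > s.2 then (p.1, p.2.2) else s) (-1, -1)

-- ===== PORT B =====
def calc_donyoku_alt (my_x : Int) (my_wv_list : List (Int × Int)) : Int × Int :=
  -- pass 1: best eligible value; max(gen, default=-1) ported via PySem.List.max? / getD
  let best := (PySem.List.max?
      (my_wv_list.filterMap (fun p => if p.1 ≤ my_x then some p.2 else none))
      (fun v => v)).getD (-1)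
  if best ≤ -1 then (-1, -1)
  else
    -- pass 2: next(i for ...); the default -1 is unreachable here (best > -1 guarantees a hit)
    let idx := (((PySem.List.enumerate my_wv_list).find?
        (fun p => decide (p.2.1 ≤ my_x) && (p.2.2 == best))).map Prod.fst).getD (-1)
    (idx, best)

-- ===== PRECONDITION & SPEC =====
def Spec_calc_donyoku (my_x : Int) (my_wv_list : List (Int × Int)) (out : Int × Int) : Prop := out = calc_donyoku_alt my_x my_wv_list
instance (my_x : Int) (my_wv_list : List (Int × Int)) (out : Int × Int) : Decidable (Spec_calc_donyoku my_x my_wv_list out) := by unfold Spec_calc_donyoku; infer_instance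

-- ===== CLAIM (what is proved, stated in full; the proofs are below) =====
def Claim_equal_calc_donyoku : Prop := ∀ (my_x : Int) (my_wv_list : List (Int × Int)), Dom_calc_donyoku my_x my_wv_list → Spec_calc_donyoku my_x my_wv_list (calc_donyoku my_x my_wv_list)

-- ===== LEMMAS AND PROOFS =====

-- running max of the eligible values, seeded with s (the value component of A's state)
def eligMax (x s : Int) (l : List (Int × Int)) : Int :=
  l.foldl (fun a p => if p.1 ≤ x then max a p.2 else a) s

theorem le_eligMax (x : Int) (l : List (Int × Int)) : ∀ s : Int, s ≤ eligMax x s l := by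
  induction l with
  | nil => intro s; simp [eligMax]
  | cons p t ih =>
    intro s
    by_cases h : p.1 ≤ x
    · have := ih (max s p.2)
      simp only [eligMax, List.foldl_cons, if_pos h] at *
      exact le_trans (le_max_left s p.2) this
    · simp only [eligMax, List.foldl_cons, if_neg h] at *
      exact ih s

theorem eligMax_filterMap (x : Int) (l : List (Int × Int)) : ∀ s : Int,
    eligMax x s l = (l.filterMap (fun p => if p.1 ≤ x then some p.2 else none)).foldl max s := by
  induction l with
  | nil => intro s; simp [eligMax]
  | cons p t ih =>
    intro s
    by_cases h : p.1 ≤ x <;> simp [eligMax, h] at * <;> simp [ih]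

theorem foldl_max_max (t : List Int) : ∀ a b : Int, t.foldl max (max a b) = max a (t.foldl max b) := by
  induction t with
  | nil => intro a b; simp
  | cons c t ih =>
    intro a b
    simp only [List.foldl_cons]
    rw [max_assoc, ih]

-- the main invariant: A's fold computes eligMax and, when it improves on the seed,
-- the index of the first eligible occurrence of that maximum
theorem fold_main (x : Int) (l : List (Int × Int)) : ∀ (k idx mv : Int),
    (eligMax x mv l > mv →
      ∃ j w, (PySem.List.enumerate l k).find?
            (fun p => decide (p.2.1 ≤ x) && (p.2.2 == eligMax x mv l)) = some (j, w, eligMax x mv l) ∧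
          (PySem.List.enumerate l k).foldl
            (fun s p => if p.2.1 ≤ x ∧ p.2.2 > s.2 then (p.1, p.2.2) else s) (idx, mv)
            = (j, eligMax x mv l)) ∧
    (¬ eligMax x mv l > mv →
      (PySem.List.enumerate l k).foldl
        (fun s p => if p.2.1 ≤ x ∧ p.2.2 > s.2 then (p.1, p.2.2) else s) (idx, mv) = (idx, mv)) := by
  induction l with
  | nil => intro k idx mv; simp [eligMax, PySem.List.enumerate]
  | cons p t ih =>
    intro k idx mv
    rw [PySem.List.enumerate_cons]
    by_cases hw : p.1 ≤ x
    · by_cases hv : p.2 > mv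
      · -- A updates to (k, p.2)
        have hM : eligMax x mv (p :: t) = eligMax x p.2 t := by
          simp [eligMax, hw, max_eq_right (le_of_lt hv)]
        have hge : p.2 ≤ eligMax x p.2 t := le_eligMax x t p.2
        constructor
        · intro _
          rcases lt_or_eq_of_le hge with hlt | heq
          · -- maximum comes strictly later: head does not match the predicate
            obtain ⟨j, w, hfind, hfold⟩ := (ih (k + 1) k p.2).1 hlt
            refine ⟨j, w, ?_, ?_⟩
            · rw [List.find?_cons]
              have hh : (decide (p.1 ≤ x) && (p.2 == eligMax x mv (p :: t))) = false := by
                simp [hM]; intro _; omega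
              rw [hh, hM]; exact hfind
            · rw [List.foldl_cons, if_pos ⟨hw, hv⟩, hM]; exact hfold
          · -- head itself is the maximum
            refine ⟨k, p.1, ?_, ?_⟩
            · rw [List.find?_cons]
              have hh : (decide (p.1 ≤ x) && (p.2 == eligMax x mv (p :: t))) = true := by
                simp [hM, hw, ← heq]
              rw [hh]; simp [hM, ← heq]
            · rw [List.foldl_cons, if_pos ⟨hw, hv⟩, hM, ← heq]
              exact (ih (k + 1) k p.2).2 (by omega)
        · intro hnot
          exfalso
          have : mv < eligMax x mv (p :: t) := by rw [hM]; omega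
          omega
      · -- eligible but not an improvement: state unchanged
        have hpm : p.2 ≤ mv := by omega
        have hM : eligMax x mv (p :: t) = eligMax x mv t := by
          simp [eligMax, hw, max_eq_left hpm]
        constructor
        · intro hgt
          rw [hM] at hgt
          obtain ⟨j, w, hfind, hfold⟩ := (ih (k + 1) idx mv).1 hgt
          refine ⟨j, w, ?_, ?_⟩
          · rw [List.find?_cons]
            have hh : (decide (p.1 ≤ x) && (p.2 == eligMax x mv (p :: t))) = false := by
              simp [hM]; intro _; omega
            rw [hh, hM]; exact hfind
          · rw [List.foldl_cons, if_neg (fun h => hv h.2), hM]; exact hfold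
        · intro hnot
          rw [hM] at hnot
          rw [List.foldl_cons, if_neg (fun h => hv h.2)]
          exact (ih (k + 1) idx mv).2 hnot
    · -- ineligible: skipped by both fold and find
      have hM : eligMax x mv (p :: t) = eligMax x mv t := by simp [eligMax, hw]
      constructor
      · intro hgt
        rw [hM] at hgt
        obtain ⟨j, w, hfind, hfold⟩ := (ih (k + 1) idx mv).1 hgt
        refine ⟨j, w, ?_, ?_⟩
        · rw [List.find?_cons]
          have hh : (decide (p.1 ≤ x) && (p.2 == eligMax x mv (p :: t))) = false := by simp [hw]
          rw [hh, hM]; exact hfind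
        · rw [List.foldl_cons, if_neg (by tauto), hM]; exact hfold
      · intro hnot
        rw [hM] at hnot
        rw [List.foldl_cons, if_neg (by tauto)]
        exact (ih (k + 1) idx mv).2 hnot

-- ===== VERDICT (by name: the statement is the Claim_ definition above) =====
theorem calc_donyoku_spec : Claim_equal_calc_donyoku := by
  intro my_x l _
  unfold Spec_calc_donyoku calc_donyoku calc_donyoku_alt
  set vals := l.filterMap (fun p => if p.1 ≤ my_x then some p.2 else none) with hvals
  have hM : eligMax my_x (-1) l = max (-1) ((PySem.List.max? vals (fun v => v)).getD (-1)) := by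
    rw [eligMax_filterMap, ← hvals]
    cases vals with
    | nil => simp [PySem.List.max?]
    | cons v t =>
      rw [PySem.List.max?_id_cons]
      simp only [Option.getD_some, List.foldl_cons]
      have : max (-1 : Int) v = max (-1) (max (-1) v) := by omega
      rw [show (max (-1 : Int) v) = max (-1) v from rfl, foldl_max_max]
  set best := (PySem.List.max? vals (fun v => v)).getD (-1) with hbest
  by_cases hb : best ≤ -1
  · have hM1 : eligMax my_x (-1) l = -1 := by omega
    rw [if_pos hb]
    have := (fold_main my_x l 0 (-1) (-1)).2 (by omega)
    simpa using this
  · have hMb : eligMax my_x (-1) l = best := by omega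
    rw [if_neg hb]
    obtain ⟨j, w, hfind, hfold⟩ := (fold_main my_x l 0 (-1) (-1)).1 (by omega)
    rw [hMb] at hfind hfold
    simp only [] at *
    rw [hfold, hfind]
    simp
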